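-- pv_equiv track=rewrite | github.com/sabinoroselli/bin_packing-covering | package_preprocessing.py | fitss
-- ===== SOURCE A (Python) =====
-- def concat(xss):
--     return [x for xs in xss for x in xs]
--
-- def snoc(xs, x):
--     res = xs.copy()
--     res.append(x)
--     return res
--
-- def fitss(vms, partial, target):
--     vm = vms.pop(0)
--     v, m = vm[0], vm[1]
--     c = max([target // v, 0])
--
--     if len(vms) == 0:
--         partial.append((v, c))
--         return [partial.copy()]
--     else:
--         return concat(
--             [fitss(vms.copy(), snoc(partial, (v, d)), target - d * v) for d in range(0, min(m + 1, c + 1))])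
-- ===== SOURCE B (Python) =====
-- # Iterative re-implementation: explicit DFS stack instead of recursion+concat.
-- # Equivalence is about the return value; like A, it pops vms[0] from the caller's list
-- # (A additionally appends to `partial` when vms has a single item; B never mutates `partial`).
-- def fitss(vms, partial, target):
--     vm = vms.pop(0)
--     results = []
--     stack = [([vm] + vms, list(partial), target)]
--     while stack:
--         items, path, remaining = stack.pop()
--         (v, m), rest = items[0], items[1:]
--         c = max(remaining // v, 0)
--         if not rest:
--             results.append(path + [(v, c)])
--         else:
--             # push d = min(m, c) .. 0 so d = 0 is expanded first (A's DFS order)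
--             for d in range(min(m, c), -1, -1):
--                 stack.append((rest, path + [(v, d)], remaining - d * v))
--     return results
-- ===== Notes on version B (the rewrite author's own statement) =====
-- stated objective: alternative
-- what changed: Replaces A's recursion with concat-of-comprehension and list copying by a single iterative DFS over an explicit LIFO stack of (items, path, remaining) frames that appends results in A's order. Pre_ excludes exactly the inputs where A raises: empty vms (IndexError) and lists where a vm with value 0 is reached (every earlier m nonnegative), where A raises ZeroDivisionError.
import Mathlib
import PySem

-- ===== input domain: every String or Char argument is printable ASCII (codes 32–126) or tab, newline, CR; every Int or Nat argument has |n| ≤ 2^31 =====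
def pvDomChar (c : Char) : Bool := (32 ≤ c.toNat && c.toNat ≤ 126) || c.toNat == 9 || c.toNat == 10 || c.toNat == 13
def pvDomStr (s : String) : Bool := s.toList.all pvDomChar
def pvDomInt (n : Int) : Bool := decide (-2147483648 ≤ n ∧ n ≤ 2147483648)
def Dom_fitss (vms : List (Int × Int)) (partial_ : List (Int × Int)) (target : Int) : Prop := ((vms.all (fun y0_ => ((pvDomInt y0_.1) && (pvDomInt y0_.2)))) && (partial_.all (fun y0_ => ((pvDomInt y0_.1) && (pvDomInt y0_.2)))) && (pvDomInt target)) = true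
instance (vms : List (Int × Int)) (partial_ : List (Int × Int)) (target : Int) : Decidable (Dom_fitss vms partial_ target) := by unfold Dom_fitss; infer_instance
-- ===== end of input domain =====

-- B replaces A's recursion-with-concat by a single iterative DFS over an explicit LIFO
-- stack of frames (alternative decomposition, same cost). Equivalence is about the RETURN
-- value only: both Pythons pop vms[0] from the caller's list, but A additionally appends
-- to `partial` when vms has a single item, which B does not.

-- ===== PORT A =====
-- literal transliteration of A: pop the head, c = max(target // v, 0); on the last vm
-- emit partial + [(v, c)]; otherwise concat the recursive calls for d in range(0, min(m+1, c+1))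
def fitss (vms : List (Int × Int)) (partial_ : List (Int × Int)) (target : Int) : List (List (Int × Int)) :=
  match vms with
  | [] => []   -- Python raises IndexError on vms.pop(0) here; excluded by Pre_fitss
  | (v, m) :: rest =>
    let c : Int := max (PySem.Int.floordiv target v) 0
    if rest = [] then
      [partial_ ++ [(v, c)]]
    else
      ((PySem.List.pyRange 0 (min (m + 1) (c + 1)) 1).map
        (fun d => fitss rest (partial_ ++ [(v, d)]) (target - d * v))).flatMap id

-- ===== PORT B =====
-- termination measure for Source B's while-loop: a frame weighs ∏ (max m 0 + 2) over its items
def pvWeight (items : List (Int × Int)) : Nat :=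
  (items.map (fun p => (max p.2 0).toNat + 2)).prod

def pvStackW (stack : List (List (Int × Int) × List (Int × Int) × Int)) : Nat :=
  (stack.map (fun f => pvWeight f.1)).sum

theorem pvWeight_pos (items : List (Int × Int)) : 0 < pvWeight items := by
  unfold pvWeight
  apply List.prod_pos
  intro x hx
  simp at hx
  obtain ⟨a, b, _, rfl⟩ := hx
  omega

theorem pvStackW_append (a b : List (List (Int × Int) × List (Int × Int) × Int)) :
    pvStackW (a ++ b) = pvStackW a + pvStackW b := by simp [pvStackW]

theorem pvStackW_cons (f : List (Int × Int) × List (Int × Int) × Int)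
    (s : List (List (Int × Int) × List (Int × Int) × Int)) :
    pvStackW (f :: s) = pvWeight f.1 + pvStackW s := by simp [pvStackW]

theorem pvSumConst (l : List Int) (w : Nat) (f : Int → List (Int × Int) × List (Int × Int) × Int)
    (hf : ∀ d, pvWeight (f d).1 = w) :
    pvStackW (l.map f) = l.length * w := by
  induction l with
  | nil => simp [pvStackW]
  | cons a t ih => simp only [List.map_cons, pvStackW_cons, hf a, List.length_cons] at *; rw [ih]; ring

-- popping a frame and pushing its ≤ max m 0 + 1 children (each one item shorter) shrinks the measure
theorem pvPush_lt (v m c : Int) (rest path : List (Int × Int)) (remaining : Int)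
    (stack' : List (List (Int × Int) × List (Int × Int) × Int)) :
    pvStackW (((PySem.List.pyRange 0 (min m c + 1) 1).map
        (fun d => (rest, path ++ [(v, d)], remaining - d * v))) ++ stack')
      < pvStackW (((v, m) :: rest, path, remaining) :: stack') := by
  have hw := pvWeight_pos rest
  have hsum := pvSumConst (PySem.List.pyRange 0 (min m c + 1) 1) (pvWeight rest)
    (fun d => (rest, path ++ [(v, d)], remaining - d * v)) (fun d => rfl)
  rw [pvStackW_append, pvStackW_cons, hsum, PySem.List.length_pyRange_one]
  have hcons : pvWeight ((v, m) :: rest) = ((max m 0).toNat + 2) * pvWeight rest := by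
    simp [pvWeight]
  rw [hcons]
  have h1 : (min m c + 1 - 0).toNat < (max m 0).toNat + 2 := by omega
  exact Nat.add_lt_add_right ((Nat.mul_lt_mul_right hw).mpr h1) _

-- the while-stack loop of Source B; the head of the list is the top of the Python stack.
-- Python pushes the child frames for d = min(m,c) … 0 one by one onto an end-popped stack,
-- which on this head-top representation is the frames for d = 0 … min(m,c) prepended in order.
def fitssLoop (stack : List (List (Int × Int) × List (Int × Int) × Int))
    (results : List (List (Int × Int))) : List (List (Int × Int)) :=
  match stack with
  | [] => results
  | (items, path, remaining) :: stack' =>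
    match items with
    | [] => fitssLoop stack' results   -- unreachable: every pushed frame has nonempty items
    | (v, m) :: rest =>
      let c : Int := max (PySem.Int.floordiv remaining v) 0
      if rest = [] then
        fitssLoop stack' (results ++ [path ++ [(v, c)]])
      else
        fitssLoop (((PySem.List.pyRange 0 (min m c + 1) 1).map
            (fun d => (rest, path ++ [(v, d)], remaining - d * v))) ++ stack') results
termination_by pvStackW stack
decreasing_by
  · simp [pvStackW_cons, pvWeight]
  · rw [pvStackW_cons]
    exact Nat.lt_add_of_pos_left (pvWeight_pos _)
  · exact pvPush_lt v m _ rest path remaining stack'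

-- Source B: pop vms[0], then run the loop on a single frame carrying the full item list
def fitss_alt (vms : List (Int × Int)) (partial_ : List (Int × Int)) (target : Int) : List (List (Int × Int)) :=
  match vms with
  | [] => []   -- Python raises IndexError on vms.pop(0) here; excluded by Pre_fitss
  | vm :: rest => fitssLoop [(vm :: rest, partial_, target)] []

-- ===== PRECONDITION & SPEC =====
-- Pre_ excludes exactly the inputs where the Python A raises: empty vms (IndexError on pop)
-- and lists where some vm with value 0 is reached (it is reached iff every earlier m is ≥ 0,
-- since only a negative m prunes a level), where A raises ZeroDivisionError.
def Pre_fitss (vms : List (Int × Int)) (partial_ : List (Int × Int)) (target : Int) : Prop :=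
  vms ≠ [] ∧ ∀ i, i < vms.length → (vms[i]!).1 = 0 → ∃ j, j < i ∧ (vms[j]!).2 < 0
instance (vms : List (Int × Int)) (partial_ : List (Int × Int)) (target : Int) : Decidable (Pre_fitss vms partial_ target) := by unfold Pre_fitss; infer_instance

def pvWitness_fitss : (List (Int × Int)) × (List (Int × Int)) × Int := ([(2, 1), (3, 2)], [], 7)

def Spec_fitss (vms : List (Int × Int)) (partial_ : List (Int × Int)) (target : Int) (out : List (List (Int × Int))) : Prop := out = fitss_alt vms partial_ target
instance (vms : List (Int × Int)) (partial_ : List (Int × Int)) (target : Int) (out : List (List (Int × Int))) : Decidable (Spec_fitss vms partial_ target out) := by unfold Spec_fitss; infer_instance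

-- ===== CLAIM (what is proved, stated in full; the proofs are below) =====
def Claim_equal_fitss : Prop := ∀ (vms : List (Int × Int)) (partial_ : List (Int × Int)) (target : Int), Dom_fitss vms partial_ target → Pre_fitss vms partial_ target → Spec_fitss vms partial_ target (fitss vms partial_ target)

-- ===== LEMMAS AND PROOFS =====

-- loop invariant: the loop emits, in order, A's result for every frame on the stack
set_option maxRecDepth 4000 in
theorem fitssLoop_eq (stack : List (List (Int × Int) × List (Int × Int) × Int))
    (results : List (List (Int × Int))) :
    fitssLoop stack results = results ++ stack.flatMap (fun f => fitss f.1 f.2.1 f.2.2) := by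
  induction stack, results using fitssLoop.induct with
  | case1 results => simp [fitssLoop]
  | case2 results path remaining stack' ih => simp [fitssLoop, fitss, ih]
  | case3 results path remaining stack' v m c ih =>
    simp only [c] at ih
    simp only [fitssLoop, fitss, List.flatMap_cons]
    simp [ih]
  | case4 results path remaining stack' v m rest c h ih =>
    have hmin : min m (max (PySem.Int.floordiv remaining v) 0) + 1
        = min (m + 1) (max (PySem.Int.floordiv remaining v) 0 + 1) := by omega
    simp only [c, hmin] at ih
    simp only [fitssLoop, if_neg h]
    rw [hmin, ih]
    simp only [List.flatMap_append, List.flatMap_cons, List.flatMap_map]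
    simp only [fitss]
    rw [if_neg h]
    simp only [List.flatMap_map, id_eq]

-- ===== VERDICT (by name: the statement is the Claim_ definition above) =====
theorem fitss_spec : Claim_equal_fitss := by
  intro vms partial_ target _ hpre
  unfold Spec_fitss
  match vms, hpre with
  | vm :: rest, _ => simp [fitss_alt, fitssLoop_eq]
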